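-- pv_equiv track=rewrite | github.com/Prajwal-M-2003/cheeko-eval-report | tools/provider_alignment_ranges.py | to_ranges
-- ===== SOURCE A (Python) =====
-- def to_ranges(indices: list[int]) -> list[tuple[int, int]]:
--     if not indices:
--         return []
--     indices = sorted(indices)
--     ranges: list[tuple[int, int]] = []
--     start = prev = indices[0]
--     for idx in indices[1:]:
--         if idx == prev + 1:
--             prev = idx
--             continue
--         ranges.append((start, prev))
--         start = prev = idx
--     ranges.append((start, prev))
--     return ranges
-- ===== SOURCE B (Python) =====
-- def to_ranges(indices: list[int]) -> list[tuple[int, int]]: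
--     s = sorted(indices)
--     if not s:
--         return []
--     # Staged passes: a break occurs between neighbours that are not consecutive.
--     pairs = list(zip(s, s[1:]))
--     starts = [s[0]] + [b for a, b in pairs if a + 1 != b]
--     ends = [a for a, b in pairs if a + 1 != b] + [s[-1]]
--     return list(zip(starts, ends))
-- ===== Notes on version B (the rewrite author's own statement) =====
-- stated objective: alternative
-- what changed: Replaced A's single-pass start/prev accumulator state machine by staged passes: zip the sorted list with its own tail to locate run breaks, build the list of run starts and the list of run ends as two comprehensions, and zip them into the result.
import Mathlib
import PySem

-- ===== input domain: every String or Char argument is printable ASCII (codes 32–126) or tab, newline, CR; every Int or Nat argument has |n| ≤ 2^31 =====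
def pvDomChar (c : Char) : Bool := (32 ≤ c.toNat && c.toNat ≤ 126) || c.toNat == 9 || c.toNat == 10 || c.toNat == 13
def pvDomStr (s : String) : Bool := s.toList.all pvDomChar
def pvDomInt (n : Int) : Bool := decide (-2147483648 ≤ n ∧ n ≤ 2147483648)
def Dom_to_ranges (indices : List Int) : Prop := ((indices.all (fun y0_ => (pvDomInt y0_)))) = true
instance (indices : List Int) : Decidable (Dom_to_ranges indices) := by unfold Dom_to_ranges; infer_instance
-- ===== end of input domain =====

-- B replaces A's start/prev accumulator state machine by staged passes: zip the
-- sorted list with its tail to find run breaks, build the starts and ends lists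
-- separately, and zip them (alternative decomposition, same cost).


-- ===== PORT A =====
-- A's loop over indices[1:] with state (ranges, start, prev); the final
-- 'ranges.append((start, prev))' is the [] case.
def toRangesGo (ranges : List (Int × Int)) (start prev : Int) : List Int → List (Int × Int)
  | [] => ranges ++ [(start, prev)]
  | idx :: rest =>
    if idx = prev + 1 then toRangesGo ranges start idx rest
    else toRangesGo (ranges ++ [(start, prev)]) idx idx rest

def to_ranges (indices : List Int) : List (Int × Int) :=
  match PySem.List.sorted indices (fun x => x) false with
  | [] => []                      -- 'if not indices: return []' (sorted is [] iff indices is [])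
  | first :: rest => toRangesGo [] first first rest   -- start = prev = indices[0]; loop over indices[1:]

-- ===== PORT B =====
-- Source B step for step: sort; empty guard; pairs = zip(s, s[1:]) (s[1:] of
-- x :: xs is xs); starts / ends comprehensions over pairs; zip(starts, ends).
-- s[-1] on the nonempty list x :: xs is xs.getLastD x.
def to_ranges_alt (indices : List Int) : List (Int × Int) :=
  match PySem.List.sorted indices (fun x => x) false with
  | [] => []
  | x :: xs =>
    let pairs := (x :: xs).zip xs
    let starts := x :: (pairs.filter (fun p => p.1 + 1 ≠ p.2)).map Prod.snd
    let ends := (pairs.filter (fun p => p.1 + 1 ≠ p.2)).map Prod.fst ++ [xs.getLastD x]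
    starts.zip ends

-- ===== PRECONDITION & SPEC =====
def Spec_to_ranges (indices : List Int) (out : List (Int × Int)) : Prop := out = to_ranges_alt indices
instance (indices : List Int) (out : List (Int × Int)) : Decidable (Spec_to_ranges indices out) := by unfold Spec_to_ranges; infer_instance

-- ===== CLAIM (what is proved, stated in full; the proofs are below) =====
def Claim_equal_to_ranges : Prop := ∀ (indices : List Int), Dom_to_ranges indices → Spec_to_ranges indices (to_ranges indices)

-- ===== LEMMAS AND PROOFS =====
-- Reference decomposition both ports are reduced to: peel the maximal leading
-- run of consecutive integers, emit it as one range, recurse on the rest.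
def spanRun : Int → List Int → Int × List Int
  | e, [] => (e, [])
  | e, x :: xs => if x = e + 1 then spanRun x xs else (e, x :: xs)

theorem spanRun_length (e : Int) (xs : List Int) : (spanRun e xs).2.length ≤ xs.length := by
  induction xs generalizing e with
  | nil => simp [spanRun]
  | cons x xs ih =>
    simp only [spanRun]
    split_ifs
    · exact le_trans (ih x) (Nat.le_succ _)
    · simp

def rangesOf : List Int → List (Int × Int)
  | [] => []
  | x :: xs => (x, (spanRun x xs).1) :: rangesOf (spanRun x xs).2
termination_by l => l.length
decreasing_by
  simpa using Nat.lt_succ_of_le (spanRun_length x xs)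

theorem toRangesGo_eq (xs : List Int) (ranges : List (Int × Int)) (s p : Int) :
    toRangesGo ranges s p xs
      = ranges ++ (s, (spanRun p xs).1) :: rangesOf (spanRun p xs).2 := by
  induction xs generalizing ranges s p with
  | nil => simp [toRangesGo, spanRun, rangesOf]
  | cons x xs ih =>
    simp only [toRangesGo, spanRun]
    split_ifs with h
    · exact ih ranges s x
    · rw [ih (ranges ++ [(s, p)]) x x]
      simp [rangesOf, List.append_assoc]

def breaksOf (x : Int) (xs : List Int) : List (Int × Int) :=
  ((x :: xs).zip xs).filter (fun p => p.1 + 1 ≠ p.2)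

theorem alt_eq_rangesOf (xs : List Int) (x : Int) :
    (x :: (breaksOf x xs).map Prod.snd).zip
      ((breaksOf x xs).map Prod.fst ++ [xs.getLastD x]) = rangesOf (x :: xs) := by
  induction xs generalizing x with
  | nil => simp [breaksOf, rangesOf, spanRun]
  | cons y ys ih =>
    have hb : breaksOf x (y :: ys)
        = if x + 1 = y then breaksOf y ys else (x, y) :: breaksOf y ys := by
      simp only [breaksOf, List.zip_cons_cons, List.filter_cons]
      by_cases h : x + 1 = y
      · simp [h]
      · simp [h]
    have hlast : (y :: ys).getLastD x = ys.getLastD y := by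
      cases ys with
      | nil => rfl
      | cons a as =>
        simp only [List.getLastD_eq_getLast?, List.getLast?_cons_cons]
        cases hq : (a :: as).getLast? with
        | none => simp [List.getLast?_eq_none_iff] at hq
        | some v => rfl
    by_cases h : y = x + 1
    · -- run continues: same breaks, head start replaced by x
      have hr : rangesOf (x :: y :: ys) =
          (x, (spanRun y ys).1) :: rangesOf (spanRun y ys).2 := by
        rw [rangesOf]; simp [spanRun, h]
      have hr' : rangesOf (y :: ys) =
          (y, (spanRun y ys).1) :: rangesOf (spanRun y ys).2 := by
        rw [rangesOf]
      have ihy := ih y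
      rw [hr'] at ihy
      rw [hb, if_pos h.symm, hlast, hr]
      -- ends list is nonempty; compare heads/tails of the zip
      rcases he : (breaksOf y ys).map Prod.fst ++ [ys.getLastD y] with _ | ⟨c, cs⟩
      · exact absurd he (by simp)
      · rw [he] at ihy
        simp only [List.zip_cons_cons] at ihy ⊢
        obtain ⟨h1, h2⟩ := List.cons_eq_cons.mp ihy
        have hc : c = (spanRun y ys).1 := congrArg Prod.snd h1
        rw [hc, h2]
    · -- break between x and y: emit (x, x) and recurse
      have hr : rangesOf (x :: y :: ys) = (x, x) :: rangesOf (y :: ys) := by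
        rw [rangesOf]; simp [spanRun, h]
      rw [hb, if_neg (fun hx => h hx.symm), hlast, hr]
      simp only [List.map_cons, List.cons_append, List.zip_cons_cons]
      exact congrArg _ (ih y)

-- ===== VERDICT (by name: the statement is the Claim_ definition above) =====
theorem to_ranges_spec : Claim_equal_to_ranges := by
  intro indices _
  unfold Spec_to_ranges to_ranges to_ranges_alt
  cases h : PySem.List.sorted indices (fun x => x) false with
  | nil => rfl
  | cons x xs =>
    have hro : rangesOf (x :: xs)
        = (x, (spanRun x xs).1) :: rangesOf (spanRun x xs).2 := by rw [rangesOf]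
    show toRangesGo [] x x xs = _
    rw [toRangesGo_eq, List.nil_append, ← hro, ← alt_eq_rangesOf xs x]
    rfl
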